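-- pv_equiv track=rewrite | github.com/syl0702/algo | programmers/문자열밀기/sol.py | solution
-- ===== SOURCE A (Python) =====
-- def solution(A, B):
--
--     i = 0
--     if A == B:
--         return 0
--     else:
--         while i < len(A):
--             i += 1
--             A = A[-1] + A[:-1]
--             if A == B:
--                 return i
--     return -1
-- ===== SOURCE B (Python) =====
-- def solution(A, B):
--     # Rotation search via substring search of B in A+A (rfind gives the
--     # smallest right-rotation count), instead of rotating A one step at a time.
--     if A == B:
--         return 0
--     if len(A) != len(B):
--         return -1
--     j = (A + A).rfind(B)
--     return len(A) - j if j != -1 else -1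
-- ===== Notes on version B (the rewrite author's own statement) =====
-- stated objective: faster
-- what changed: Instead of rotating A one character at a time and comparing after every rotation, B finds the rotation offset with a single substring search of B in A+A (rfind, so the smallest rotation count wins) after an O(1) length check.
import Mathlib
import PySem

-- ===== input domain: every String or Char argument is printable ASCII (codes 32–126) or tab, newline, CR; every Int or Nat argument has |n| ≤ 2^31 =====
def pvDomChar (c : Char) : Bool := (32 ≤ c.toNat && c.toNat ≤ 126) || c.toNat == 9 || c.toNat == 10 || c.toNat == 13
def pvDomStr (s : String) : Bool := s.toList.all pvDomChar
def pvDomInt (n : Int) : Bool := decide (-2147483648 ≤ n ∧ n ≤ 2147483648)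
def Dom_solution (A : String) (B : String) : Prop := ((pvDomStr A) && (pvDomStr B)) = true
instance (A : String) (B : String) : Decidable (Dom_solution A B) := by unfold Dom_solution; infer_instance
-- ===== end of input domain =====

-- B replaces A's one-rotation-per-step loop with a single substring search of B in A+A (rfind).

-- ===== PORT A =====
-- Python strings are carried as List Char (the PySem.Str operations are thin wrappers over toList).
-- One loop body: A = A[-1] + A[:-1]; A[-1] via PySem.List.pyGet? (its 'none' arm is where Python
-- would raise IndexError, unreachable here: the loop runs only while i < len(A), so A ≠ "").
def pyRotA (s : List Char) : List Char :=
  (match PySem.List.pyGet? s (-1) with | some c => [c] | none => []) ++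
    PySem.List.slice s none (some (-1))

-- the 'while i < len(A)' loop; fuel = len(A) suffices: i rises by 1 each pass and len(A) is preserved.
def solutionLoop (b : List Char) : Nat → List Char → Int → Int
  | 0, _, _ => -1
  | f + 1, s, i =>
    if i < (s.length : Int) then
      let s' := pyRotA s
      if s' = b then i + 1 else solutionLoop b f s' (i + 1)
    else -1

def solution (A : String) (B : String) : Int :=
  if A == B then 0 else solutionLoop B.toList A.toList.length A.toList 0

-- ===== PORT B =====
def solution_alt (A : String) (B : String) : Int :=
  if A == B then 0
  else if A.toList.length ≠ B.toList.length then -1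
  else
    let j := PySem.Chars.rfind (A.toList ++ A.toList) B.toList   -- (A + A).rfind(B)
    if j ≠ -1 then (A.toList.length : Int) - j else -1

-- ===== PRECONDITION & SPEC =====
def Spec_solution (A : String) (B : String) (out : Int) : Prop := out = solution_alt A B
instance (A : String) (B : String) (out : Int) : Decidable (Spec_solution A B out) := by unfold Spec_solution; infer_instance

-- ===== CLAIM (what is proved, stated in full; the proofs are below) =====
def Claim_equal_solution : Prop := ∀ (A : String) (B : String), Dom_solution A B → Spec_solution A B (solution A B)

-- ===== LEMMAS AND PROOFS =====

-- the state of A's loop after (len a - j) rotations, written as a left-rotation of the original a by j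
def seg (a : List Char) (j : Nat) : List Char := a.drop j ++ a.take j

theorem length_pyRotA (s : List Char) : (pyRotA s).length = s.length := by
  unfold pyRotA
  rcases s.eq_nil_or_concat with rfl | ⟨t, x, rfl⟩
  · simp [PySem.List.pyGet?, PySem.List.slice]
  · rw [List.concat_eq_append, PySem.List.pyGet?_neg_one_append_singleton]
    simp [PySem.List.slice_to_neg_one]

-- one loop body maps the rotation state seg a (j+1) to seg a j
theorem pyRotA_seg (a : List Char) (j : Nat) (hj : j + 1 ≤ a.length) :
    pyRotA (seg a (j + 1)) = seg a j := by
  unfold pyRotA seg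
  have hja : j < a.length := hj
  rw [List.take_add_one, List.getElem?_eq_getElem hja]
  have h2 : a.drop (j + 1) ++ (a.take j ++ [a[j]]) = (a.drop (j+1) ++ a.take j) ++ [a[j]] := by simp
  simp only [Option.toList_some, h2]
  rw [PySem.List.pyGet?_neg_one_append_singleton, PySem.List.slice_to_neg_one]
  rw [List.dropLast_concat]
  show a[j] :: (List.drop (j+1) a ++ List.take j a) = _
  rw [← List.cons_append, ← List.drop_eq_getElem_cons hja]

-- len(A) ≠ len(B): every equality test in A's loop fails, so it returns -1
theorem loopA_len_ne (b : List Char) (f : Nat) (s : List Char) (i : Int)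
    (h : s.length ≠ b.length) : solutionLoop b f s i = -1 := by
  induction f generalizing s i with
  | zero => rfl
  | succ f ih =>
    simp only [solutionLoop]
    split
    · rw [if_neg, ih]
      · rw [length_pyRotA]; exact h
      · intro he; exact h (by rw [← he, length_pyRotA])
    · rfl

-- a match of B at start j of A+A is exactly the rotation state seg a j
theorem prefix_drop_iff_seg (a b : List Char) (j : Nat) (hj : j ≤ a.length)
    (hb : b.length = a.length) :
    b.isPrefixOf ((a ++ a).drop j) = true ↔ seg a j = b := by
  rw [List.isPrefixOf_iff_prefix]
  have hdrop : (a ++ a).drop j = seg a j ++ a.drop j := by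
    rw [List.drop_append_of_le_length hj]
    unfold seg
    conv_lhs => rw [show (a : List Char) = a.take j ++ a.drop j from (List.take_append_drop j a).symm]
    simp
  rw [hdrop]
  have hlen : (seg a j).length = a.length := by
    unfold seg; simp; omega
  constructor
  · intro hp
    rcases List.prefix_or_prefix_of_prefix hp (List.prefix_append _ _) with h1 | h1
    · exact (List.IsPrefix.eq_of_length h1 (by omega)).symm
    · exact (List.IsPrefix.eq_of_length h1 (by omega))
  · rintro rfl
    exact List.prefix_append _ _

theorem length_seg (a : List Char) (j : Nat) : (seg a j).length = a.length := by
  unfold seg; simp; omega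

-- unfolding lemmas for PySem.Chars.rfind.go (the scan of start positions from the right)
theorem go_succ (s b : List Char) (j : Nat) :
    PySem.Chars.rfind.go s b (j + 1) =
      if b.isPrefixOf (s.drop (j + 1)) = true then ((j : Int) + 1) else PySem.Chars.rfind.go s b j := by
  simp only [PySem.Chars.rfind.go]
  push_cast
  rfl

theorem go_zero (s b : List Char) :
    PySem.Chars.rfind.go s b 0 = if b.isPrefixOf s = true then 0 else -1 := by
  simp only [PySem.Chars.rfind.go]

theorem loop_succ (b : List Char) (f : Nat) (s : List Char) (i : Int) :
    solutionLoop b (f + 1) s i =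
      if i < (s.length : Int) then
        (if pyRotA s = b then i + 1 else solutionLoop b f (pyRotA s) (i + 1))
      else -1 := rfl

-- the core correspondence: A's loop from state seg a (g+1) equals rfind's scan from start g
theorem main_loop (a b : List Char) (hb : b.length = a.length) (g : Nat)
    (hg : g + 1 ≤ a.length) :
    solutionLoop b (g + 1) (seg a (g + 1)) ((a.length : Int) - (g + 1)) =
      (if PySem.Chars.rfind.go (a ++ a) b g = -1 then -1
       else (a.length : Int) - PySem.Chars.rfind.go (a ++ a) b g) := by
  induction g with
  | zero =>
    have hpre : b.isPrefixOf (a ++ a) = true ↔ seg a 0 = b := by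
      have := prefix_drop_iff_seg a b 0 (by omega) hb
      simpa using this
    rw [loop_succ, length_seg, go_zero, if_pos (by push_cast; omega), pyRotA_seg a 0 (by omega)]
    by_cases h : seg a 0 = b
    · rw [if_pos h, if_pos (hpre.2 h), if_neg (by norm_num)]
      push_cast; ring
    · rw [if_neg h, if_neg (fun hc => h (hpre.1 hc))]
      rfl
  | succ g ih =>
    have hpre : b.isPrefixOf ((a ++ a).drop (g + 1)) = true ↔ seg a (g + 1) = b :=
      prefix_drop_iff_seg a b (g + 1) (by omega) hb
    rw [loop_succ, length_seg, if_pos (by push_cast; omega), pyRotA_seg a (g + 1) hg, go_succ]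
    by_cases h : seg a (g + 1) = b
    · rw [if_pos h, if_pos (hpre.2 h), if_neg (by push_cast; omega)]
      push_cast; ring
    · rw [if_neg h, if_neg (fun hc => h (hpre.1 hc)), ← ih (by omega)]
      congr 1
      push_cast; ring

-- no match of B starts at positions len(a) .. 2·len(a) of A+A when A ≠ B and lengths agree
theorem go_high (a b : List Char) (hb : b.length = a.length) (hne : a ≠ b)
    (hn : 1 ≤ a.length) (k : Nat) :
    PySem.Chars.rfind.go (a ++ a) b (a.length + k) =
      PySem.Chars.rfind.go (a ++ a) b (a.length - 1) := by
  induction k with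
  | zero =>
    obtain ⟨m, hm⟩ : ∃ m, a.length = m + 1 := ⟨a.length - 1, by omega⟩
    rw [Nat.add_zero, hm, go_succ]
    rw [if_neg]
    · simp
    · rw [← hm, List.drop_left, List.isPrefixOf_iff_prefix]
      intro hp
      exact hne ((List.IsPrefix.eq_of_length hp hb).symm)
  | succ k ih =>
    rw [← Nat.add_assoc, go_succ, if_neg, ih]
    rw [List.isPrefixOf_iff_prefix]
    intro hp
    have := hp.length_le
    simp at this
    omega

-- ===== VERDICT (by name: the statement is the Claim_ definition above) =====
theorem solution_spec : Claim_equal_solution := by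
  intro A B _
  unfold Spec_solution solution solution_alt
  by_cases hAB : A == B
  · rw [if_pos hAB, if_pos hAB]
  · rw [if_neg hAB, if_neg hAB]
    have hne : A.toList ≠ B.toList := by
      intro h
      exact hAB (by simp [beq_iff_eq]; exact String.toList_inj.mp h)
    by_cases hlen : A.toList.length = B.toList.length
    · rw [if_neg (by omega)]
      set a := A.toList
      set b := B.toList
      have hn : 1 ≤ a.length := by
        rcases Nat.eq_zero_or_pos a.length with h0 | h1
        · exfalso
          apply hne
          have ha : a = [] := List.eq_nil_of_length_eq_zero h0
          have hbn : b = [] := List.eq_nil_of_length_eq_zero (by omega)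
          rw [ha, hbn]
        · exact h1
      obtain ⟨m, hm⟩ : ∃ m, a.length = m + 1 := ⟨a.length - 1, by omega⟩
      have hseg : seg a (m + 1) = a := by
        unfold seg
        rw [← hm]
        simp
      have hrfind : PySem.Chars.rfind (a ++ a) b = PySem.Chars.rfind.go (a ++ a) b m := by
        unfold PySem.Chars.rfind
        rw [List.length_append, hm]
        have := go_high a b hlen.symm hne hn (m + 1)
        rw [hm] at this
        simpa using this
      have hmain := main_loop a b hlen.symm m (by omega)
      rw [hseg] at hmain
      have hi : (a.length : Int) - (↑m + 1) = 0 := by omega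
      rw [hi] at hmain
      rw [hm] at hmain ⊢
      rw [hmain, hrfind]
      by_cases hgo : PySem.Chars.rfind.go (a ++ a) b m = -1
      · rw [if_pos hgo, if_neg (by simpa using hgo)]
      · rw [if_neg hgo, if_pos hgo]
    · rw [if_pos hlen]
      exact loopA_len_ne _ _ _ _ hlen
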